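-- pv_equiv track=rewrite | github.com/smartprasad2001-cyber/MIID | variation_generator_simple.py | apply_replace_double_letters
-- ===== SOURCE A (Python) =====
-- def has_double_letters(name: str) -> bool:
--     """Check if a name has any double letters."""
--     name_lower = name.lower()
--     for i in range(len(name_lower) - 1):
--         if name_lower[i] == name_lower[i+1]:
--             return True
--     return False
--
-- def apply_replace_double_letters(name: str) -> str:
--     """Replace double letters with a single letter"""
--     if not has_double_letters(name):
--         return name
--     name_lower = name.lower()
--     for i in range(len(name_lower) - 1):
--         if name_lower[i] == name_lower[i+1] and name[i].isalpha():
--             return name[:i+1] + name[i+2:]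
--     return name
-- ===== SOURCE B (Python) =====
-- def apply_replace_double_letters(name: str) -> str:
--     """Replace double letters with a single letter"""
--     result = name
--     for i in range(len(name) - 2, -1, -1):
--         if name[i].isalpha() and name[i].lower() == name[i + 1].lower():
--             result = name[:i + 1] + name[i + 2:]
--     return result
-- ===== Notes on version B (the rewrite author's own statement) =====
-- stated objective: alternative
-- what changed: Replaces A's two forward scans (a has_double_letters pre-check plus a forward early-return search over a lowered copy) with a single backward full scan that keeps overwriting the result, so the last match processed (the leftmost doubled alphabetic letter) wins; no pre-check, no lowered copy, no early return.
import Mathlib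
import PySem

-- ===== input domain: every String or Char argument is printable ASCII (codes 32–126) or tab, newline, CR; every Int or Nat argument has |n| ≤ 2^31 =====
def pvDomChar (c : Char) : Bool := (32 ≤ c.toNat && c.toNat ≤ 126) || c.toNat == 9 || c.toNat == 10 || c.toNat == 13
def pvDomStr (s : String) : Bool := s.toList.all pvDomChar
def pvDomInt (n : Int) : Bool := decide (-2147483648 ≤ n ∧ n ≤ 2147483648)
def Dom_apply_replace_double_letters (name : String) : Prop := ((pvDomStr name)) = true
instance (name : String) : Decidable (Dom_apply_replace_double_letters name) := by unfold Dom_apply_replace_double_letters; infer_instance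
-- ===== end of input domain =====

-- B replaces A's two forward scans (pre-check + forward early-return search over a lowered copy)
-- with a single backward full scan keeping the leftmost match (objective: alternative).

-- ===== PORT A =====
-- `for i in range(len(name_lower) - 1): if name_lower[i] == name_lower[i+1]: return True` / `return False`
def pvHdLoop (low : List Char) (i : Nat) : Bool :=
  if i + 1 < low.length then
    if PySem.List.pyGetD low ((i : Nat) : Int) ' ' == PySem.List.pyGetD low ((i + 1 : Nat) : Int) ' ' then
      true
    else pvHdLoop low (i + 1)
  else false
termination_by low.length - i

def has_double_letters (name : String) : Bool :=
  pvHdLoop (PySem.Chars.lower name.toList) 0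

-- the main loop of A: first i with name_lower[i] == name_lower[i+1] and name[i].isalpha()
def pvALoop (nameL low : List Char) (i : Nat) : List Char :=
  if i + 1 < low.length then
    if (PySem.List.pyGetD low ((i : Nat) : Int) ' ' == PySem.List.pyGetD low ((i + 1 : Nat) : Int) ' ')
        && PySem.Chars.isalpha (PySem.List.pyGetD nameL ((i : Nat) : Int) ' ') then
      PySem.List.slice nameL none (some ((i + 1 : Nat) : Int))
        ++ PySem.List.slice nameL (some ((i + 2 : Nat) : Int)) none
    else pvALoop nameL low (i + 1)
  else nameL
termination_by low.length - i

def apply_replace_double_letters (name : String) : String :=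
  if !(has_double_letters name) then name
  else String.ofList (pvALoop name.toList (PySem.Chars.lower name.toList) 0)

-- ===== PORT B =====
-- the body of Source B's loop: `if name[i].isalpha() and name[i].lower() == name[i+1].lower(): result = name[:i+1] + name[i+2:]`
def pvBStep (nameL : List Char) (acc : List Char) (i : Int) : List Char :=
  if PySem.Chars.isalpha (PySem.List.pyGetD nameL i ' ')
      && (PySem.Chars.lowerChar (PySem.List.pyGetD nameL i ' ')
            == PySem.Chars.lowerChar (PySem.List.pyGetD nameL (i + 1) ' ')) then
    PySem.List.slice nameL none (some (i + 1)) ++ PySem.List.slice nameL (some (i + 2)) none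
  else acc

-- `result = name; for i in range(len(name) - 2, -1, -1): …; return result`
def apply_replace_double_letters_alt (name : String) : String :=
  String.ofList
    ((PySem.List.pyRange ((name.toList.length : Int) - 2) (-1) (-1)).foldl
      (pvBStep name.toList) name.toList)

-- ===== PRECONDITION & SPEC =====
def Spec_apply_replace_double_letters (name : String) (out : String) : Prop := out = apply_replace_double_letters_alt name
instance (name : String) (out : String) : Decidable (Spec_apply_replace_double_letters name out) := by unfold Spec_apply_replace_double_letters; infer_instance

-- ===== CLAIM (what is proved, stated in full; the proofs are below) =====
def Claim_equal_apply_replace_double_letters : Prop := ∀ (name : String), Dom_apply_replace_double_letters name → Spec_apply_replace_double_letters name (apply_replace_double_letters name)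

-- ===== LEMMAS AND PROOFS =====

-- the shared predicate: a doubled alphabetic letter at Nat position k
def pvPb (nameL : List Char) (k : Nat) : Bool :=
  PySem.Chars.isalpha (nameL.getD k ' ')
    && (PySem.Chars.lowerChar (nameL.getD k ' ') == PySem.Chars.lowerChar (nameL.getD (k + 1) ' '))

-- the spliced result at Int position i
def pvSpl (nameL : List Char) (i : Int) : List Char :=
  PySem.List.slice nameL none (some (i + 1)) ++ PySem.List.slice nameL (some (i + 2)) none

lemma pv_getD_map_lower (l : List Char) (i : Nat) :
    (l.map PySem.Chars.lowerChar).getD i ' ' = PySem.Chars.lowerChar (l.getD i ' ') := by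
  simp only [List.getD_eq_getElem?_getD, List.getElem?_map]
  cases l[i]? <;> rfl

-- B's step at a Nat-cast index is the predicate/splice pair
lemma pvBStep_cast (nameL acc : List Char) (k : Nat) :
    pvBStep nameL acc ((k : Nat) : Int) =
      if pvPb nameL k then pvSpl nameL ((k : Nat) : Int) else acc := by
  unfold pvBStep pvPb pvSpl
  rw [show ((k : Int) + 1) = ((k + 1 : Nat) : Int) by push_cast; ring]
  simp only [PySem.List.pyGetD_natCast]

-- A's main loop from index i is the first match on [i, n-2]
lemma pvALoop_eq_find (nameL : List Char) (i : Nat) :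
    pvALoop nameL (nameL.map PySem.Chars.lowerChar) i =
      match (List.range' i (nameL.length - 1 - i)).find? (pvPb nameL) with
      | some k => pvSpl nameL ((k : Nat) : Int)
      | none => nameL := by
  unfold pvALoop
  by_cases h : i + 1 < (nameL.map PySem.Chars.lowerChar).length
  · have hn : i + 1 < nameL.length := by simpa using h
    have hlen : nameL.length - 1 - i = (nameL.length - 1 - (i + 1)) + 1 := by omega
    rw [if_pos h, hlen, List.range'_succ]
    have hcond :
        ((PySem.List.pyGetD (nameL.map PySem.Chars.lowerChar) ((i : Nat) : Int) ' '
            == PySem.List.pyGetD (nameL.map PySem.Chars.lowerChar) ((i + 1 : Nat) : Int) ' ')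
          && PySem.Chars.isalpha (PySem.List.pyGetD nameL ((i : Nat) : Int) ' '))
          = pvPb nameL i := by
      unfold pvPb
      simp only [PySem.List.pyGetD_natCast, pv_getD_map_lower]
      rw [Bool.and_comm]
    rw [hcond]
    by_cases hp : pvPb nameL i
    · rw [if_pos hp, List.find?_cons_of_pos hp]
      show _ = pvSpl nameL ((i : Nat) : Int)
      unfold pvSpl
      push_cast
      try rfl
    · rw [if_neg hp, List.find?_cons_of_neg hp]
      exact pvALoop_eq_find nameL (i + 1)
  · have hn : ¬ i + 1 < nameL.length := by simpa using h
    have : nameL.length - 1 - i = 0 := by omega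
    rw [if_neg h, this]
    simp
termination_by nameL.length - i
decreasing_by simp at h; omega

-- B's backward fold over [j, j-1, …, 0] keeps the smallest match on [0, j], else the accumulator
lemma pvB_fold_eq_find (nameL : List Char) (j : Nat) (acc : List Char) :
    (PySem.List.pyRange ((j : Nat) : Int) (-1) (-1)).foldl (pvBStep nameL) acc =
      match (List.range (j + 1)).find? (pvPb nameL) with
      | some k => pvSpl nameL ((k : Nat) : Int)
      | none => acc := by
  induction j generalizing acc with
  | zero =>
    rw [PySem.List.pyRange_neg_one_cons (by omega)]
    rw [show ((0 : Nat) : Int) - 1 = -1 by decide, PySem.List.pyRange_neg_one_eq_nil le_rfl]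
    simp only [List.foldl_cons, List.foldl_nil]
    rw [pvBStep_cast]
    by_cases hp : pvPb nameL 0
    · simp [List.range_succ, hp]
    · simp [List.range_succ, hp]
  | succ j ih =>
    rw [PySem.List.pyRange_neg_one_cons (by omega)]
    rw [show ((j + 1 : Nat) : Int) - 1 = ((j : Nat) : Int) by push_cast; ring]
    rw [List.foldl_cons, ih (pvBStep nameL acc ((j + 1 : Nat) : Int)), pvBStep_cast]
    conv_rhs => rw [List.range_succ, List.find?_append]
    cases hf : (List.range (j + 1)).find? (pvPb nameL) with
    | some k => simp [Option.or]
    | none =>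
      by_cases hp : pvPb nameL (j + 1)
      · simp [hp, Option.or, List.find?]
      · simp [hp, Option.or, List.find?]

-- if the pre-scan finds no lowered doubled pair, pvPb is false at every in-range position ≥ i
lemma pv_hd_false (nameL : List Char) (i k : Nat) (hik : i ≤ k) (hk : k + 1 < nameL.length)
    (h : pvHdLoop (nameL.map PySem.Chars.lowerChar) i = false) : pvPb nameL k = false := by
  have hi : i + 1 < (nameL.map PySem.Chars.lowerChar).length := by
    simp only [List.length_map]; omega
  unfold pvHdLoop at h
  rw [if_pos hi] at h
  split at h
  · exact absurd h (by simp)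
  · rename_i hne
    rcases Nat.lt_or_ge i k with hlt | hge
    · exact pv_hd_false nameL (i + 1) k hlt hk h
    · have hik' : i = k := by omega
      subst hik'
      unfold pvPb
      simp only [PySem.List.pyGetD_natCast, pv_getD_map_lower] at hne
      simp only [Bool.and_eq_false_iff]
      right
      simpa using hne
termination_by nameL.length - i
decreasing_by simp at hi; omega

-- ===== VERDICT (by name: the statement is the Claim_ definition above) =====
theorem apply_replace_double_letters_spec : Claim_equal_apply_replace_double_letters := by
  intro name _
  unfold Spec_apply_replace_double_letters apply_replace_double_letters apply_replace_double_letters_alt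
  by_cases hn : name.toList.length ≤ 1
  · have hn2 : name.length ≤ 1 := by simpa using hn
    rw [PySem.List.pyRange_neg_one_eq_nil (by omega)]
    have hhd : has_double_letters name = false := by
      unfold has_double_letters pvHdLoop
      rw [if_neg (by simp [PySem.Chars.lower]; omega)]
    simp [hhd]
  · have hn' : 1 < name.toList.length := by omega
    have hcast : (name.toList.length : Int) - 2 = ((name.toList.length - 2 : Nat) : Int) := by
      omega
    rw [hcast, pvB_fold_eq_find name.toList (name.toList.length - 2) name.toList]
    have hrange : name.toList.length - 2 + 1 = name.toList.length - 1 := by omega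
    rw [hrange]
    by_cases hhd : has_double_letters name = true
    · rw [if_neg (by simp [hhd])]
      have hA := pvALoop_eq_find name.toList 0
      rw [show PySem.Chars.lower name.toList = name.toList.map PySem.Chars.lowerChar from rfl]
      rw [hA, Nat.sub_zero, ← List.range_eq_range']
    · have hhd' : has_double_letters name = false := by simpa using hhd
      rw [if_pos (by simp [hhd'])]
      have hnone : (List.range (name.toList.length - 1)).find? (pvPb name.toList) = none := by
        rw [List.find?_eq_none]
        intro k hkmem
        have hk : k < name.toList.length - 1 := List.mem_range.mp hkmem
        have := pv_hd_false name.toList 0 k (Nat.zero_le k) (by omega)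
          (by simpa [has_double_letters, PySem.Chars.lower] using hhd')
        simp [this]
      rw [hnone]
      simp
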